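-- pv_equiv track=rewrite | github.com/Keyurrr14/Leetcode-problems | StackThroughput.py | stack_operations
-- ===== SOURCE A (Python) =====
-- def stack_operations(n, x, y, t):
--     elements = 0
--     throughput = 0
--     total_added = 0
--     total_removed = 0
--
--     for sec in range(1, t + 1):
--         if sec % n == 0:
--             elements += x
--             throughput += x
--             total_added += x
--             elements -= y
--             throughput += y
--             total_removed += y
--         else:
--             throughput += y - x
--
--     throughput = total_added + total_removed
--
--     return elements, throughput, total_added, total_removed
-- ===== SOURCE B (Python) =====
-- def stack_operations(n, x, y, t):
--     # Closed form: the loop only changes state on the k = t // |n| multiples of n in [1, t];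
--     # throughput is overwritten at the end with total_added + total_removed.
--     k = t // abs(n) if t > 0 else 0
--     return k * (x - y), k * (x + y), k * x, k * y
-- ===== Notes on version B (the rewrite author's own statement) =====
-- stated objective: faster
-- what changed: Replaces the O(t) second-by-second loop with the closed form k = t // |n| (number of multiples of n in [1,t]) and direct products k*(x-y), k*(x+y), k*x, k*y.
import Mathlib
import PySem

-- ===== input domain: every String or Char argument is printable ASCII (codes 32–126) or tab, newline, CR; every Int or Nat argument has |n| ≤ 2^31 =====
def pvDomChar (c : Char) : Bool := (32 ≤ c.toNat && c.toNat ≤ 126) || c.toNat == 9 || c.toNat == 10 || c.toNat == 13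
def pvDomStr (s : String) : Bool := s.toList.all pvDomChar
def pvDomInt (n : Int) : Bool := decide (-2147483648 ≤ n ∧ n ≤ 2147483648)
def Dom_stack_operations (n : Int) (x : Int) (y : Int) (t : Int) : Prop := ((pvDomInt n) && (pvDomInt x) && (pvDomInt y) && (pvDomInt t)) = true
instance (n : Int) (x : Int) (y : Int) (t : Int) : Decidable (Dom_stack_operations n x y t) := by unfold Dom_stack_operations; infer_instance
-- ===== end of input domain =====

-- B replaces A's O(t) second-by-second loop with the closed form k = t // |n|: faster (asymptotic).


-- ===== PORT A =====
-- literal transliteration of A: fold over range(1, t+1) carrying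
-- (elements, throughput, total_added, total_removed); throughput overwritten at the end
def stack_operations (n : Int) (x : Int) (y : Int) (t : Int) : List Int :=
  let s := (PySem.List.pyRange 1 (t + 1) 1).foldl
    (fun (st : Int × Int × Int × Int) sec =>
      if PySem.Int.mod sec n = 0 then
        (st.1 + x - y, st.2.1 + x + y, st.2.2.1 + x, st.2.2.2 + y)
      else
        (st.1, st.2.1 + (y - x), st.2.2.1, st.2.2.2))
    (0, 0, 0, 0)
  [s.1, s.2.2.1 + s.2.2.2, s.2.2.1, s.2.2.2]

-- ===== PORT B =====
-- literal transliteration of B: closed form, k = t // abs(n) if t > 0 else 0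
def stack_operations_alt (n : Int) (x : Int) (y : Int) (t : Int) : List Int :=
  let k : Int := if t > 0 then PySem.Int.floordiv t |n| else 0
  [k * (x - y), k * (x + y), k * x, k * y]

-- ===== PRECONDITION & SPEC =====
-- A raises ZeroDivisionError exactly when n = 0 and t ≥ 1 (the loop body divides by n); excluded here.
def Pre_stack_operations (n : Int) (x : Int) (y : Int) (t : Int) : Prop := n ≠ 0 ∨ t < 1
instance (n : Int) (x : Int) (y : Int) (t : Int) : Decidable (Pre_stack_operations n x y t) := by unfold Pre_stack_operations; infer_instance
def pvWitness_stack_operations : Int × Int × Int × Int := (2, 5, 3, 9)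

def Spec_stack_operations (n : Int) (x : Int) (y : Int) (t : Int) (out : List Int) : Prop := out = stack_operations_alt n x y t
instance (n : Int) (x : Int) (y : Int) (t : Int) (out : List Int) : Decidable (Spec_stack_operations n x y t out) := by unfold Spec_stack_operations; infer_instance

-- ===== CLAIM (what is proved, stated in full; the proofs are below) =====
def Claim_equal_stack_operations : Prop := ∀ (n : Int) (x : Int) (y : Int) (t : Int), Dom_stack_operations n x y t → Pre_stack_operations n x y t → Spec_stack_operations n x y t (stack_operations n x y t)

-- ===== LEMMAS AND PROOFS =====

-- remainder step for Euclidean division by a positive divisor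
theorem ediv_succ (m d : Int) (hd : 0 < d) :
    (m + 1) / d = m / d + (if d ∣ (m + 1) then 1 else 0) := by
  have h1 : m / d * d + m % d = m := Int.ediv_mul_add_emod m d
  have h2 : 0 ≤ m % d := Int.emod_nonneg m (by omega)
  have h3 : m % d < d := Int.emod_lt_of_pos m hd
  have hrw : m + 1 = (m % d + 1) + (m / d) * d := by omega
  have hsplit : (m + 1) / d = (m % d + 1) / d + m / d := by
    rw [hrw, Int.add_mul_ediv_right _ _ (by omega : d ≠ 0)]
  have hdvd_iff : d ∣ (m + 1) ↔ m % d + 1 = d := by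
    constructor
    · intro hdvd
      have hsub : d ∣ (m + 1 - (m / d) * d) := hdvd.sub (dvd_mul_left d (m / d))
      have he : m + 1 - (m / d) * d = m % d + 1 := by omega
      rw [he] at hsub
      have := Int.le_of_dvd (by omega) hsub
      omega
    · intro he
      exact ⟨m / d + 1, by rw [mul_add, mul_one, mul_comm d (m / d)]; omega⟩
  by_cases hc : m % d + 1 = d
  · rw [if_pos (hdvd_iff.mpr hc), hsplit, hc, Int.ediv_self (by omega)]
    omega
  · rw [if_neg (fun h => hc (hdvd_iff.mp h)), hsplit,
      Int.ediv_eq_zero_of_lt (by omega) (by omega)]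
    omega

-- loop invariant: after the first m seconds the state is determined by c = m / |n|
theorem loopA (n x y : Int) (hn : n ≠ 0) (m : Nat) :
    (PySem.List.pyRange 1 ((m : Int) + 1) 1).foldl
      (fun (st : Int × Int × Int × Int) sec =>
        if PySem.Int.mod sec n = 0 then
          (st.1 + x - y, st.2.1 + x + y, st.2.2.1 + x, st.2.2.2 + y)
        else
          (st.1, st.2.1 + (y - x), st.2.2.1, st.2.2.2))
      (0, 0, 0, 0)
    = (((m : Int) / |n|) * (x - y),
       ((m : Int) / |n|) * (x + y) + ((m : Int) - (m : Int) / |n|) * (y - x),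
       ((m : Int) / |n|) * x,
       ((m : Int) / |n|) * y) := by
  induction m with
  | zero => simp [PySem.List.pyRange_one_eq_nil]
  | succ k ih =>
    have habs : 0 < |n| := abs_pos.mpr hn
    have hsplit : PySem.List.pyRange 1 ((k : Int) + 1 + 1) 1
        = PySem.List.pyRange 1 ((k : Int) + 1) 1 ++ [(k : Int) + 1] := by
      exact PySem.List.pyRange_one_succ_right (by omega)
    have hcast : ((k + 1 : Nat) : Int) = (k : Int) + 1 := by push_cast; ring
    rw [hcast, hsplit, List.foldl_append, ih]
    simp only [List.foldl_cons, List.foldl_nil]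
    have hmod : (PySem.Int.mod ((k : Int) + 1) n = 0) ↔ (|n| ∣ ((k : Int) + 1)) := by
      rw [PySem.Int.mod_eq_zero_iff_dvd]
      exact (abs_dvd n ((k : Int) + 1)).symm
    have hdiv := ediv_succ (k : Int) |n| habs
    by_cases hd : |n| ∣ ((k : Int) + 1)
    · rw [if_pos (hmod.mpr hd)]
      rw [if_pos hd] at hdiv
      simp only [hdiv, Prod.mk.injEq]
      refine ⟨by ring, by ring, by ring, by ring⟩
    · rw [if_neg (fun h => hd (hmod.mp h))]
      rw [if_neg hd] at hdiv
      simp only [hdiv, Prod.mk.injEq]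
      refine ⟨by ring, by ring, by ring, by ring⟩

-- ===== VERDICT (by name: the statement is the Claim_ definition above) =====
theorem stack_operations_spec : Claim_equal_stack_operations := by
  intro n x y t _ hpre
  unfold Spec_stack_operations stack_operations stack_operations_alt
  by_cases ht : t > 0
  · have hn : n ≠ 0 := by rcases hpre with h | h; exacts [h, by omega]
    have habs : 0 < |n| := abs_pos.mpr hn
    obtain ⟨m, hm⟩ : ∃ m : Nat, t = (m : Int) := ⟨t.toNat, by omega⟩
    subst hm
    rw [if_pos ht, PySem.Int.floordiv_eq_ediv_of_pos habs]
    simp only [loopA n x y hn m]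
    simp [mul_add]
  · have hnil : PySem.List.pyRange 1 (t + 1) 1 = [] :=
      PySem.List.pyRange_one_eq_nil (by omega)
    rw [if_neg ht]
    simp [hnil]
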